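-- pv_equiv track=rewrite | github.com/c1m50c/hacker-rank-solutions | python/array_pairs.py | solve
-- ===== SOURCE A (Python) =====
-- def solve(arr):
--     result: int = 0
--     n: int = len(arr)
--     for i in range(0, n - 1):
--         for j in range(i + 1, n):
--             if arr[i] * arr[j] <= max(arr[i : j + 1]):
--                 result += 1
--     return result
-- ===== SOURCE B (Python) =====
-- def solve(arr):
--     # Same count, but the inner max(arr[i:j+1]) scan is replaced by a running
--     # maximum maintained while j advances: O(n^2) instead of O(n^3).
--     result = 0
--     n = len(arr)
--     for i in range(n - 1):
--         a = arr[i]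
--         m = a
--         for j in range(i + 1, n):
--             b = arr[j]
--             if b > m:
--                 m = b
--             if a * b <= m:
--                 result += 1
--     return result
-- ===== Notes on version B (the rewrite author's own statement) =====
-- stated objective: faster
-- what changed: The inner max(arr[i:j+1]) rescans are removed: B maintains a running maximum while j advances, turning the O(n^3) triple pass into a plain O(n^2) double loop.
import Mathlib
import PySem

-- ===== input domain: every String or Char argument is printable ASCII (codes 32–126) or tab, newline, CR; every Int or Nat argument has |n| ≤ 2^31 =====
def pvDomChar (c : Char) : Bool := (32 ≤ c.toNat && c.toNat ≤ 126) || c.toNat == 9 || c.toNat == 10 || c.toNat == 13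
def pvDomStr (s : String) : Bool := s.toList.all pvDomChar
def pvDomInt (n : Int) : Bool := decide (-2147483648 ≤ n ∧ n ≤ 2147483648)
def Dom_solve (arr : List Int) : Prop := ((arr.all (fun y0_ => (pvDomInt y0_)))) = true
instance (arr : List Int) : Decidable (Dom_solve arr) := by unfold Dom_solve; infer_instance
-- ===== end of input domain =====

-- B replaces A's inner max(arr[i:j+1]) rescan by a running maximum carried along j
-- (objective: faster, O(n^2) instead of O(n^3)); return values are identical.

-- ===== PORT A =====
-- max(arr[i:j+1]) : the slice is nonempty for every i < j visited, so max? is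
-- always 'some'; the .getD 0 default is never used.
def solve (arr : List Int) : Int :=
  let n : Int := arr.length
  (PySem.List.pyRange 0 (n - 1) 1).foldl (fun result i =>
    (PySem.List.pyRange (i + 1) n 1).foldl (fun result j =>
      if PySem.List.pyGetD arr i 0 * PySem.List.pyGetD arr j 0 ≤
          (PySem.List.max? (PySem.List.slice arr (some i) (some (j + 1))) (fun y => y)).getD 0
      then result + 1 else result) result) 0

-- ===== PORT B =====
def solve_alt (arr : List Int) : Int :=
  let n : Int := arr.length
  (PySem.List.pyRange 0 (n - 1) 1).foldl (fun result i =>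
    let a := PySem.List.pyGetD arr i 0
    ((PySem.List.pyRange (i + 1) n 1).foldl (fun (st : Int × Int) j =>
      let b := PySem.List.pyGetD arr j 0
      let m := if b > st.2 then b else st.2
      (if a * b ≤ m then st.1 + 1 else st.1, m)) (result, a)).1) 0

-- ===== PRECONDITION & SPEC =====
def Spec_solve (arr : List Int) (out : Int) : Prop := out = solve_alt arr
instance (arr : List Int) (out : Int) : Decidable (Spec_solve arr out) := by unfold Spec_solve; infer_instance

-- ===== CLAIM (what is proved, stated in full; the proofs are below) =====
def Claim_equal_solve : Prop := ∀ (arr : List Int), Dom_solve arr → Spec_solve arr (solve arr)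

-- ===== LEMMAS AND PROOFS =====

-- extending a slice by one element on the right
lemma slice_snoc (arr : List Int) (i j : Int) (h0 : 0 ≤ i) (hij : i ≤ j)
    (hj : j < (arr.length : Int)) :
    PySem.List.slice arr (some i) (some (j + 1)) =
      PySem.List.slice arr (some i) (some j) ++ [PySem.List.pyGetD arr j 0] := by
  have h0j : (0 : Int) ≤ j := le_trans h0 hij
  have hjn : j.toNat < arr.length := by omega
  rw [PySem.List.slice_toNat arr h0 h0j,
      PySem.List.slice_toNat arr h0 (by omega : (0:Int) ≤ j + 1),
      PySem.List.pyGetD_eq_getElem arr 0 h0j hj]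
  have hji : (j + 1).toNat - i.toNat = (j.toNat - i.toNat) + 1 := by omega
  rw [hji, List.take_add_one]
  have : (List.drop i.toNat arr)[j.toNat - i.toNat]? = some arr[j.toNat] := by
    rw [List.getElem?_drop]
    have : i.toNat + (j.toNat - i.toNat) = j.toNat := by omega
    rw [this, List.getElem?_eq_getElem hjn]
  rw [this]; rfl

lemma max?_snoc (xs : List Int) (m b : Int)
    (h : PySem.List.max? xs (fun y => y) = some m) :
    PySem.List.max? (xs ++ [b]) (fun y => y) = some (max m b) := by
  cases xs with
  | nil =>
      rw [show PySem.List.max? ([] : List Int) (fun y => y) = none from rfl] at h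
      exact nomatch h
  | cons x t =>
      rw [PySem.List.max?_id_cons] at h
      rw [List.cons_append, PySem.List.max?_id_cons, List.foldl_append]
      simp_all

-- one-element slice at position i
lemma slice_single (arr : List Int) (i : Int) (h0 : 0 ≤ i) (hi : i < (arr.length : Int)) :
    PySem.List.slice arr (some i) (some (i + 1)) = [PySem.List.pyGetD arr i 0] := by
  rw [slice_snoc arr i i h0 le_rfl hi]
  rw [PySem.List.slice_toNat arr h0 h0]
  simp

-- the inner loops agree whenever the B-state's maximum is the maximum of arr[i:j]
lemma inner_eq (arr : List Int) (a i : Int) (h0 : 0 ≤ i) :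
    ∀ (k : Nat) (j m r : Int), i < j → j ≤ (arr.length : Int) →
    ((arr.length : Int) - j).toNat = k →
    PySem.List.max? (PySem.List.slice arr (some i) (some j)) (fun y => y) = some m →
    (PySem.List.pyRange j (arr.length : Int) 1).foldl (fun result j' =>
      if a * PySem.List.pyGetD arr j' 0 ≤
          (PySem.List.max? (PySem.List.slice arr (some i) (some (j' + 1))) (fun y => y)).getD 0
      then result + 1 else result) r
    = ((PySem.List.pyRange j (arr.length : Int) 1).foldl (fun (st : Int × Int) j' =>
        let b := PySem.List.pyGetD arr j' 0
        let m' := if b > st.2 then b else st.2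
        (if a * b ≤ m' then st.1 + 1 else st.1, m')) (r, m)).1 := by
  intro k
  induction k with
  | zero =>
      intro j m r hij hj hk hm
      have : (arr.length : Int) ≤ j := by omega
      rw [PySem.List.pyRange_one_eq_nil this]
      simp
  | succ k ih =>
      intro j m r hij hj hk hm
      have hjlt : j < (arr.length : Int) := by omega
      rw [PySem.List.pyRange_one_cons hjlt]
      simp only [List.foldl_cons]
      have hmax : PySem.List.max? (PySem.List.slice arr (some i) (some (j + 1))) (fun y => y)
          = some (max m (PySem.List.pyGetD arr j 0)) := by
        rw [slice_snoc arr i j h0 (le_of_lt hij) hjlt]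
        exact max?_snoc _ _ _ hm
      have hmm : (if PySem.List.pyGetD arr j 0 > m then PySem.List.pyGetD arr j 0 else m)
          = max m (PySem.List.pyGetD arr j 0) := by
        by_cases h : PySem.List.pyGetD arr j 0 > m
        · simp [h]; omega
        · simp [h]; omega
      rw [hmax]
      simp only [Option.getD_some]
      rw [hmm]
      exact ih (j + 1) (max m (PySem.List.pyGetD arr j 0))
        (if a * PySem.List.pyGetD arr j 0 ≤ max m (PySem.List.pyGetD arr j 0) then r + 1 else r)
        (by omega) (by omega) (by omega) hmax

-- ===== VERDICT (by name: the statement is the Claim_ definition above) =====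
theorem solve_spec : Claim_equal_solve := by
  intro arr _
  show solve arr = solve_alt arr
  unfold solve solve_alt
  simp only []
  apply PySem.List.foldl_congr_mem
  intro r i hi
  rw [PySem.List.mem_pyRange_one] at hi
  obtain ⟨h0, hlt⟩ := hi
  have hi' : i < (arr.length : Int) := by omega
  have hsingle : PySem.List.max?
      (PySem.List.slice arr (some i) (some (i + 1))) (fun y => y)
      = some (PySem.List.pyGetD arr i 0) := by
    rw [slice_single arr i h0 hi', PySem.List.max?_id_cons]
    simp
  exact inner_eq arr (PySem.List.pyGetD arr i 0) i h0
    (((arr.length : Int) - (i + 1)).toNat) (i + 1) (PySem.List.pyGetD arr i 0) r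
    (by omega) (by omega) rfl hsingle
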